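-- pv_equiv track=rewrite | github.com/tinsarfal/ChameleonUltra | software/script/tests/test_hidprox_encoding.py | hidprox_calc_parity
-- ===== SOURCE A (Python) =====
-- def hidprox_calc_parity(data, start_bit, length, parity_type):
--     """Python implementation of HID Prox parity calculation"""
--     parity = 0
--     for i in range(length):
--         if (data >> (start_bit + i)) & 1:
--             parity ^= 1
--     # For odd parity, invert the result
--     if parity_type == 1:
--         parity ^= 1
--     return parity
-- ===== SOURCE B (Python) =====
-- def hidprox_calc_parity(data, start_bit, length, parity_type):
--     """HID Prox parity: extract the bit field in one mask/shift, use popcount parity."""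
--     field = (data >> start_bit) & ((1 << length) - 1) if length > 0 else 0
--     parity = field.bit_count() & 1
--     if parity_type == 1:
--         parity ^= 1
--     return parity
-- ===== Notes on version B (the rewrite author's own statement) =====
-- stated objective: faster
-- what changed: Replaces the per-bit shift/test/xor loop over all length bits with a single shift+mask extraction of the whole bit field followed by int.bit_count() parity.
import Mathlib
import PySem

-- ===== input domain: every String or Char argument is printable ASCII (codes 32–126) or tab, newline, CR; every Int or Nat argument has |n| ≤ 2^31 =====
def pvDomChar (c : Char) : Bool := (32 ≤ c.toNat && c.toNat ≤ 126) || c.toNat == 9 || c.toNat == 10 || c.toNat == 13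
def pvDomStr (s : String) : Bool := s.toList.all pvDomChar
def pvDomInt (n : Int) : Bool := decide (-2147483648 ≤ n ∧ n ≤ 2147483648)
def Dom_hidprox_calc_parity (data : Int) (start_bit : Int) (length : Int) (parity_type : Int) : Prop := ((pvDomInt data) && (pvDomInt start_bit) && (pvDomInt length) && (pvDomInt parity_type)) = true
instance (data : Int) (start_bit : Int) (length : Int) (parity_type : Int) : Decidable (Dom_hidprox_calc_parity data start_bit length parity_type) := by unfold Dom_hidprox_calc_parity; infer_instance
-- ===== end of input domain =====

-- B replaces A's per-bit shift/test/xor loop by a one-shot mask extraction of the bit field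
-- plus popcount parity.


-- ===== PORT A =====
-- literal transliteration of A's loop; '.toNat' on the shift amount is exact on Pre_
-- (Python raises ValueError on a negative shift count, which Pre_ excludes)
def hidprox_calc_parity (data : Int) (start_bit : Int) (length : Int) (parity_type : Int) : Int :=
  let parity : Int :=
    (PySem.List.pyRange 0 length 1).foldl
      (fun parity i =>
        if PySem.Int.band (data >>> (start_bit + i).toNat) 1 ≠ 0 then PySem.Int.bxor parity 1
        else parity) 0
  if parity_type = 1 then PySem.Int.bxor parity 1 else parity

-- ===== PORT B =====
-- literal transliteration of Source B; '.toNat' on the shift amounts is exact on Pre_ as above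
def hidprox_calc_parity_alt (data : Int) (start_bit : Int) (length : Int) (parity_type : Int) : Int :=
  let field : Int :=
    if 0 < length then
      PySem.Int.band (data >>> start_bit.toNat) (((1 : Int) <<< length.toNat) - 1)
    else 0
  let parity : Int := PySem.Int.band ((PySem.Int.bitCount field : Nat) : Int) 1
  if parity_type = 1 then PySem.Int.bxor parity 1 else parity

-- ===== PRECONDITION & SPEC =====
-- Pre_ excludes exactly the inputs where Python A raises ValueError (a negative shift count,
-- which happens iff 0 < length ∧ start_bit < 0); Python B raises there too.
def Pre_hidprox_calc_parity (data : Int) (start_bit : Int) (length : Int) (parity_type : Int) : Prop :=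
  0 < length → 0 ≤ start_bit
instance (data : Int) (start_bit : Int) (length : Int) (parity_type : Int) : Decidable (Pre_hidprox_calc_parity data start_bit length parity_type) := by unfold Pre_hidprox_calc_parity; infer_instance

def pvWitness_hidprox_calc_parity : Int × Int × Int × Int := (29, 1, 4, 1)

def Spec_hidprox_calc_parity (data : Int) (start_bit : Int) (length : Int) (parity_type : Int) (out : Int) : Prop := out = hidprox_calc_parity_alt data start_bit length parity_type
instance (data : Int) (start_bit : Int) (length : Int) (parity_type : Int) (out : Int) : Decidable (Spec_hidprox_calc_parity data start_bit length parity_type out) := by unfold Spec_hidprox_calc_parity; infer_instance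

-- ===== CLAIM (what is proved, stated in full; the proofs are below) =====
def Claim_equal_hidprox_calc_parity : Prop := ∀ (data : Int) (start_bit : Int) (length : Int) (parity_type : Int), Dom_hidprox_calc_parity data start_bit length parity_type → Pre_hidprox_calc_parity data start_bit length parity_type → Spec_hidprox_calc_parity data start_bit length parity_type (hidprox_calc_parity data start_bit length parity_type)

-- ===== LEMMAS AND PROOFS =====

-- low-bit/high-bits split of emod by a power of two
theorem pv_emod_two_pow_succ (x : Int) (l : Nat) :
    x % (2 ^ (l + 1)) = x % 2 + 2 * ((x / 2) % (2 ^ l)) := by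
  have h2l : (0 : Int) < 2 ^ l := by positivity
  have hx1 : 2 * (x / 2) + x % 2 = x := Int.ediv_add_emod x 2
  have hx2 : 2 ^ l * ((x / 2) / 2 ^ l) + (x / 2) % (2 ^ l) = x / 2 :=
    Int.ediv_add_emod (x / 2) (2 ^ l)
  have hr0 : 0 ≤ x % 2 := Int.emod_nonneg x (by norm_num)
  have hr1 : x % 2 < 2 := Int.emod_lt_of_pos x (by norm_num)
  have hm0 : 0 ≤ (x / 2) % (2 ^ l) := Int.emod_nonneg _ (by positivity : (0:Int) < 2 ^ l).ne'
  have hm1 : (x / 2) % (2 ^ l) < 2 ^ l := Int.emod_lt_of_pos _ h2l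
  have hx : x = (x % 2 + 2 * ((x / 2) % (2 ^ l))) + 2 ^ (l + 1) * ((x / 2) / 2 ^ l) := by
    rw [pow_succ]; nlinarith [hx1, hx2]
  calc x % (2 ^ (l + 1))
      = ((x % 2 + 2 * ((x / 2) % (2 ^ l))) + 2 ^ (l + 1) * ((x / 2) / 2 ^ l)) % (2 ^ (l + 1)) := by
        rw [← hx]
    _ = (x % 2 + 2 * ((x / 2) % (2 ^ l))) % (2 ^ (l + 1)) := by
        rw [Int.add_mul_emod_self_left]
    _ = x % 2 + 2 * ((x / 2) % (2 ^ l)) :=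
        Int.emod_eq_of_lt (by omega) (by rw [pow_succ]; omega)

-- Python's  x & (2**l - 1)  is  x mod 2**l  (also for negative x)
theorem pv_band_mask (x : Int) (l : Nat) :
    PySem.Int.band x ((2 : Int) ^ l - 1) = x % (2 ^ l) := by
  have h2l : (1 : Nat) ≤ 2 ^ l := Nat.one_le_two_pow
  have hcast : ((2 : Int) ^ l - 1) = ((2 ^ l - 1 : Nat) : Int) := by push_cast [h2l]; ring
  by_cases hx : 0 ≤ x
  · conv_lhs => rw [hcast, ← Int.toNat_of_nonneg hx]
    conv_rhs => rw [← Int.toNat_of_nonneg hx]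
    rw [PySem.Int.band_natCast, Nat.and_two_pow_sub_one_eq_mod]
    push_cast
    rfl
  · -- negative x: unfold band's two's-complement branch
    have hxneg : ¬ 0 ≤ x := hx
    have hmasknn : (0 : Int) ≤ (2 : Int) ^ l - 1 := by
      have : (1 : Int) ≤ 2 ^ l := by exact_mod_cast h2l
      omega
    rw [PySem.Int.band, if_neg hxneg, if_pos hmasknn]
    have hmt : ((2 : Int) ^ l - 1).toNat = 2 ^ l - 1 := by
      rw [hcast, Int.toNat_natCast]
    rw [hmt, Nat.and_comm, Nat.and_two_pow_sub_one_eq_mod]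
    set y : Nat := (-x - 1).toNat with hy
    have hyx : (y : Int) = -x - 1 := by
      rw [hy]; omega
    set r : Nat := y % 2 ^ l with hrdef
    have hrlt : r < 2 ^ l := Nat.mod_lt _ (by omega)
    have hyd : 2 ^ l * (y / 2 ^ l) + r = y := Nat.div_add_mod y (2 ^ l)
    have hxeq : x = ((2 ^ l - 1 - r : Nat) : Int) + ((2 : Int) ^ l) * (-(((y / 2 ^ l) : Nat) : Int) - 1) := by
      have h1 : ((2 ^ l - 1 - r : Nat) : Int) = (2 : Int) ^ l - 1 - (r : Int) := by
        push_cast [Nat.sub_sub]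
        have : (1 + r : Nat) ≤ 2 ^ l := by omega
        push_cast [this]
        ring
      have h2 : (y : Int) = ((2 : Int) ^ l) * (((y / 2 ^ l) : Nat) : Int) + (r : Int) := by
        exact_mod_cast congrArg (Nat.cast : Nat → Int) hyd.symm
      have h3 : x = -(y : Int) - 1 := by omega
      rw [h1, h3, h2]; ring
    calc ((2 ^ l - 1 - r : Nat) : Int)
        = (((2 ^ l - 1 - r : Nat) : Int) + ((2 : Int) ^ l) * (-(((y / 2 ^ l) : Nat) : Int) - 1)) % (2 ^ l) := by
          rw [Int.add_mul_emod_self_left]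
          refine (Int.emod_eq_of_lt (by positivity) ?_).symm
          have : (2 ^ l - 1 - r : Nat) < 2 ^ l := by omega
          exact_mod_cast this
      _ = x % (2 ^ l) := by rw [← hxeq]

-- popcount of r + 2m splits off the low bit
theorem pv_bitCount_step (r m : Int) (hr : r = 0 ∨ r = 1) (hm : 0 ≤ m) :
    PySem.Int.bitCount (r + 2 * m) = r.toNat + PySem.Int.bitCount m := by
  by_cases h0 : r = 0 ∧ m = 0
  · obtain ⟨h1, h2⟩ := h0
    subst h1; subst h2
    simp
  · have hpos : 0 < r + 2 * m := by rcases hr with h | h <;> subst h <;> omega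
    rw [PySem.Int.bitCount_of_pos hpos,
      PySem.Int.mod_eq_emod_of_pos (by norm_num : (0:Int) < 2),
      PySem.Int.floordiv_eq_ediv_of_pos (by norm_num : (0:Int) < 2)]
    have hmod : (r + 2 * m) % 2 = r := by rcases hr with h | h <;> subst h <;> omega
    have hdiv : (r + 2 * m) / 2 = m := by rcases hr with h | h <;> subst h <;> omega
    rw [hmod, hdiv]

-- the loop parity over the low l bits of x equals the popcount parity of x mod 2^l
theorem pv_key (l : Nat) : ∀ (x p : Int), (p = 0 ∨ p = 1) →
    (List.range l).foldl
      (fun q (k : Nat) => if PySem.Int.band (x >>> k) 1 ≠ 0 then PySem.Int.bxor q 1 else q) p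
    = PySem.Int.bxor p ((PySem.Int.bitCount (x % (2 ^ l)) % 2 : Nat) : Int) := by
  induction l with
  | zero =>
    intro x p hp
    simp [PySem.Int.bitCount_zero, PySem.Int.bxor_zero]
  | succ l ih =>
    intro x p hp
    rw [List.range_succ_eq_map, List.foldl_cons, List.foldl_map]
    set x1 : Int := x >>> (1 : Nat) with hx1def
    have hs : ∀ k : Nat, x >>> (k + 1) = x1 >>> k := fun k => by
      rw [hx1def, Nat.add_comm]; exact Int.shiftRight_add x 1 k
    simp only [Nat.succ_eq_add_one, hs]
    have hp' : (if PySem.Int.band (x >>> (0 : Nat)) 1 ≠ 0 then PySem.Int.bxor p 1 else p) = 0 ∨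
        (if PySem.Int.band (x >>> (0 : Nat)) 1 ≠ 0 then PySem.Int.bxor p 1 else p) = 1 := by
      by_cases hc : PySem.Int.band (x >>> (0 : Nat)) 1 ≠ 0
      · rw [if_pos hc]
        rcases hp with h | h <;> subst h
        · right; decide
        · left; decide
      · rw [if_neg hc]; exact hp
    rw [ih x1 _ hp']
    have hdiv1 : x1 = x / 2 := by
      rw [hx1def, Int.shiftRight_eq_div_pow]; norm_num
    have hr2 : x % 2 = 0 ∨ x % 2 = 1 := by omega
    rw [Int.shiftRight_zero, PySem.Int.band_one,
      PySem.Int.mod_eq_emod_of_pos (by norm_num : (0:Int) < 2), hdiv1,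
      pv_emod_two_pow_succ x l,
      pv_bitCount_step _ _ hr2 (Int.emod_nonneg _ (by positivity : (0:Int) < 2 ^ l).ne')]
    set bc : Nat := PySem.Int.bitCount ((x / 2) % (2 ^ l)) with hbc
    rcases Nat.mod_two_eq_zero_or_one bc with hb | hb <;>
      rcases hr2 with h | h <;> rw [h] <;> rcases hp with h' | h' <;> subst h' <;>
        simp only [hb] <;>
        first
        | (have ht : (Int.toNat 0 + bc) % 2 = bc % 2 := by omega
           rw [ht, hb]; decide)
        | (have ht : (Int.toNat 1 + bc) % 2 = (1 + bc % 2) % 2 := by omega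
           rw [ht, hb]; decide)

-- ===== VERDICT (by name: the statement is the Claim_ definition above) =====
theorem hidprox_calc_parity_spec : Claim_equal_hidprox_calc_parity := by
  intro data start_bit length parity_type _hdom hpre
  unfold Spec_hidprox_calc_parity hidprox_calc_parity hidprox_calc_parity_alt
  by_cases hl : 0 < length
  · have hs0 : 0 ≤ start_bit := hpre hl
    rw [if_pos hl]
    have hloop :
        (PySem.List.pyRange 0 length 1).foldl
          (fun parity i =>
            if PySem.Int.band (data >>> (start_bit + i).toNat) 1 ≠ 0 then PySem.Int.bxor parity 1
            else parity) 0
        = PySem.Int.band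
            ((PySem.Int.bitCount
              (PySem.Int.band (data >>> start_bit.toNat) (((1 : Int) <<< length.toNat) - 1)) : Nat) : Int) 1 := by
      rw [PySem.List.pyRange_one, List.foldl_map]
      have hidx : ∀ k : Nat, ((start_bit + (0 + (k : Int))).toNat) = start_bit.toNat + k := by
        intro k; omega
      simp only [hidx, Int.shiftRight_add]
      rw [pv_key ((length - 0).toNat) (data >>> start_bit.toNat) 0 (Or.inl rfl)]
      have hLT : (length - 0).toNat = length.toNat := by omega
      rw [hLT, Int.shiftLeft_eq, one_mul, pv_band_mask, PySem.Int.band_one,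
        PySem.Int.mod_eq_emod_of_pos (by norm_num : (0:Int) < 2)]
      rw [PySem.Int.bxor_comm, PySem.Int.bxor_zero]
      push_cast
      rfl
    rw [hloop]
  · rw [if_neg hl]
    rw [PySem.List.pyRange_one_eq_nil (by omega : length ≤ 0)]
    simp only [List.foldl_nil]
    have hb : PySem.Int.band ((PySem.Int.bitCount (0 : Int) : Nat) : Int) 1 = 0 := by decide
    rw [hb]
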